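-- pv_equiv track=rewrite | github.com/sergeypesegov/Algorythms_python | sort_by_insertion.py | sort_by_insertion
-- ===== SOURCE A (Python) =====
-- def sort_by_insertion(array):
-- 	indexes = []
-- 	for i in range(len(array)):
-- 		j = i - 1
-- 		key = array[i]
-- 		while array[j] > key and j >= 0:
-- 			array[j + 1] = array[j]
-- 			j -= 1
-- 		array[j + 1] = key
-- 		indexes.append(j + 2)
-- 	return indexes, array
-- ===== SOURCE B (Python) =====
-- def sort_by_insertion(array):
-- 	indexes = [1 + sum(1 for x in array[:i] if x <= key) for i, key in enumerate(array)]
-- 	array[:] = sorted(array)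
-- 	return indexes, array
-- ===== Notes on version B (the rewrite author's own statement) =====
-- stated objective: simpler
-- what changed: A inserts each element by shifting a growing sorted prefix in place; B computes each reported position directly as 1 + (number of earlier elements <= the current one) and produces the sorted array with one library sorted() call, with no element shifting.
import Mathlib
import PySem

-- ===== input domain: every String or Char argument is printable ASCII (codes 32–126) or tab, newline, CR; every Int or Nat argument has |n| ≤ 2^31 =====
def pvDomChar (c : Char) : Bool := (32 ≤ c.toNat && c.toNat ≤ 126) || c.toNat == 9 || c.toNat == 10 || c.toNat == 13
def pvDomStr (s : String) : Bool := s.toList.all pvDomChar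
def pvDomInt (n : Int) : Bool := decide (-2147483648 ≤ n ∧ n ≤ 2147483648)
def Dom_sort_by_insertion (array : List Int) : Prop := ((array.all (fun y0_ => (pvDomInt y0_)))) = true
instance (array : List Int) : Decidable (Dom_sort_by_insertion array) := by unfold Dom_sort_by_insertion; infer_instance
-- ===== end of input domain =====

-- B replaces A's in-place shifting by a per-element count of ≤-predecessors plus one library sort
-- (objective: simpler; the equivalence proved is about the RETURN value — both Pythons also mutate
-- `array` in place to the same sorted list).

-- ===== PORT A =====
-- the inner `while array[j] > key and j >= 0` loop: returns the final list and the final j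
def shiftLoop (arr : List Int) (key : Int) (j : Int) : List Int × Int :=
  match PySem.List.pyGet? arr j with
  | none => (arr, j)   -- Python would raise IndexError here; never reached by sort_by_insertion's calls
  | some v =>
    if h : key < v ∧ 0 ≤ j then
      shiftLoop (arr.set (j + 1).toNat v) key (j - 1)
    else (arr, j)
termination_by (j + 1).toNat
decreasing_by omega

def sort_by_insertion (array : List Int) : List Int × List Int :=
  (PySem.List.pyRange 0 (array.length : Int) 1).foldl
    (fun st i =>
      match PySem.List.pyGet? st.2 i with
      | none => st   -- unreachable: i is always a valid index
      | some key =>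
        let p := shiftLoop st.2 key (i - 1)
        (st.1 ++ [p.2 + 2], p.1.set (p.2 + 1).toNat key))
    ([], array)

-- ===== PORT B =====
def sort_by_insertion_alt (array : List Int) : List Int × List Int :=
  ((PySem.List.enumerate array 0).map (fun p =>
      (1 : Int) + ((PySem.List.slice array none (some p.1)).countP (fun x => x ≤ p.2) : Int)),
    PySem.List.sorted array (fun x => x) false)

-- ===== PRECONDITION & SPEC =====
def Spec_sort_by_insertion (array : List Int) (out : List Int × List Int) : Prop := out = sort_by_insertion_alt array
instance (array : List Int) (out : List Int × List Int) : Decidable (Spec_sort_by_insertion array out) := by unfold Spec_sort_by_insertion; infer_instance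

-- ===== CLAIM (what is proved, stated in full; the proofs are below) =====
def Claim_equal_sort_by_insertion : Prop := ∀ (array : List Int), Dom_sort_by_insertion array → Spec_sort_by_insertion array (sort_by_insertion array)

-- ===== LEMMAS AND PROOFS =====

-- in a sorted list, the first countP-(≤ key) elements are ≤ key and the rest are > key
lemma sorted_countP_split (S : List Int) (key : Int) (hs : S.Pairwise (· ≤ ·)) :
    (∀ x ∈ S.take (S.countP (fun x => x ≤ key)), x ≤ key) ∧
    (∀ y ∈ S.drop (S.countP (fun x => x ≤ key)), key < y) := by
  induction S with
  | nil => simp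
  | cons a S' ih =>
    rw [List.pairwise_cons] at hs
    obtain ⟨ha, hs'⟩ := hs
    obtain ⟨h1, h2⟩ := ih hs'
    by_cases hak : a ≤ key
    · rw [List.countP_cons_of_pos (by simpa using hak)]
      refine ⟨?_, by simpa using h2⟩
      intro x hx
      rw [List.take_succ_cons] at hx
      rcases List.mem_cons.mp hx with h | h
      · exact h ▸ hak
      · exact h1 x h
    · have hc : S'.countP (fun x => x ≤ key) = 0 :=
        List.countP_eq_zero.mpr (by
          intro b hb
          simpa using fun hbk => hak (le_trans (ha b hb) hbk))
      rw [List.countP_cons_of_neg (by simpa using hak), hc]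
      refine ⟨by simp, ?_⟩
      intro y hy
      simp only [List.drop_zero] at hy
      rcases List.mem_cons.mp hy with h | h
      · exact h ▸ lt_of_not_ge hak
      · exact lt_of_lt_of_le (lt_of_not_ge hak) (ha y h)
lemma shiftLoop_spec (key : Int) (S : List Int) (z : Int) (tail : List Int)
    (hs : S.Pairwise (· ≤ ·)) :
    ∃ arr' : List Int,
      shiftLoop (S ++ z :: tail) key ((S.length : Int) - 1) =
        (arr', (S.countP (fun x => x ≤ key) : Int) - 1) ∧
      arr'.set (S.countP (fun x => x ≤ key)) key =
        S.take (S.countP (fun x => x ≤ key)) ++ key ::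
          (S.drop (S.countP (fun x => x ≤ key)) ++ tail) := by
  induction S using List.reverseRecOn generalizing z tail with
  | nil =>
    refine ⟨z :: tail, ?_, by simp⟩
    rw [shiftLoop]
    have : PySem.List.pyGet? (z :: tail) (-1) = some ((z :: tail).getLast (by simp)) := by
      rw [PySem.List.pyGet?_neg_one, List.getLast?_eq_some_getLast]
    simp [this]
  | append_singleton S₀ a ih =>
    have hs₀ : S₀.Pairwise (· ≤ ·) := hs.sublist (List.sublist_append_left _ _)
    have hget : PySem.List.pyGet? ((S₀ ++ [a]) ++ z :: tail) (((S₀ ++ [a]).length : Int) - 1)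
        = some a := by
      have h1 : (S₀ ++ [a]) ++ z :: tail = S₀ ++ a :: z :: tail := by simp
      have h2 : (((S₀ ++ [a]).length : Int) - 1) = (S₀.length : Int) := by simp
      rw [h1, h2, PySem.List.pyGet?_append_length]
    by_cases hak : key < a
    · -- loop body runs
      have hcnt : (S₀ ++ [a]).countP (fun x => x ≤ key) = S₀.countP (fun x => x ≤ key) := by
        simp [List.countP_append, not_le.mpr hak]
      have hcle : S₀.countP (fun x => x ≤ key) ≤ S₀.length := List.countP_le_length
      obtain ⟨arr', h1, h2⟩ := ih a (a :: tail) hs₀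
      refine ⟨arr', ?_, ?_⟩
      · rw [shiftLoop, hget]
        simp only []
        rw [dif_pos ⟨hak, by simp only [List.length_append, List.length_cons, List.length_nil]; omega⟩]
        have hset : ((S₀ ++ [a]) ++ z :: tail).set ((((S₀ ++ [a]).length : Int) - 1) + 1).toNat a
            = S₀ ++ a :: a :: tail := by
          have : ((((S₀ ++ [a]).length : Int) - 1) + 1).toNat = S₀.length + 1 := by simp
          rw [this]
          have h1 : (S₀ ++ [a]) ++ z :: tail = S₀ ++ a :: z :: tail := by simp
          rw [h1]
          simp
        rw [hset]
        have hj : (((S₀ ++ [a]).length : Int) - 1) - 1 = ((S₀.length : Int) - 1) := by simp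
        rw [hj, hcnt]
        exact h1
      · rw [hcnt, List.take_append_of_le_length hcle, List.drop_append_of_le_length hcle]
        rw [h2]
        simp
    · -- a ≤ key: loop exits immediately
      have hka : a ≤ key := le_of_not_gt hak
      have hall : ∀ x ∈ S₀ ++ [a], x ≤ key := by
        intro x hx
        rcases List.mem_append.mp hx with h | h
        · have := (List.pairwise_append.mp hs).2.2 x h a (by simp)
          exact le_trans this hka
        · simp only [List.mem_singleton] at h; exact h ▸ hka
      have hcnt : (S₀ ++ [a]).countP (fun x => x ≤ key) = (S₀ ++ [a]).length :=
        List.countP_eq_length.mpr (by intro x hx; simpa using hall x hx)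
      refine ⟨(S₀ ++ [a]) ++ z :: tail, ?_, ?_⟩
      · rw [shiftLoop, hget]
        simp only []
        rw [dif_neg (fun hcon => absurd hcon.1 hak)]
        rw [hcnt]
      · rw [hcnt]
        simp only [List.length_append, List.length_cons, List.length_nil]
        rw [show S₀.length + 1 = (S₀ ++ [a]).length by simp, List.take_length]
        simp
lemma sorted_insert_eq (array : List Int) (i : Nat) (hi : i < array.length) :
    PySem.List.sorted (array.take (i+1)) (fun x => x) false =
      (PySem.List.sorted (array.take i) (fun x => x) false).take
          ((PySem.List.sorted (array.take i) (fun x => x) false).countP (fun x => x ≤ array[i])) ++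
        array[i] ::
      (PySem.List.sorted (array.take i) (fun x => x) false).drop
          ((PySem.List.sorted (array.take i) (fun x => x) false).countP (fun x => x ≤ array[i])) := by
  set S := PySem.List.sorted (array.take i) (fun x => x) false with hS
  set c := S.countP (fun x => x ≤ array[i]) with hc
  have hsp : S.Pairwise (· ≤ ·) := PySem.List.sorted_pairwise _ _
  obtain ⟨h1, h2⟩ := sorted_countP_split S array[i] hsp
  have hperm : (S.take c ++ array[i] :: S.drop c).Perm (array.take (i+1)) := by
    have p1 : (S.take c ++ array[i] :: S.drop c).Perm (array[i] :: S) := by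
      simpa [List.take_append_drop] using
        (List.perm_middle (a := array[i]) (l₁ := S.take c) (l₂ := S.drop c))
    have p2 : (array[i] :: S).Perm (array.take i ++ [array[i]]) :=
      ((PySem.List.sorted_perm _ _ _).cons _).trans (List.perm_append_singleton _ _).symm
    exact p1.trans (p2.trans (by rw [← List.take_succ_eq_append_getElem hi]))
  have hpw : (S.take c ++ array[i] :: S.drop c).Pairwise (· ≤ ·) := by
    rw [List.pairwise_append]
    refine ⟨hsp.sublist (List.take_sublist _ _), ?_, ?_⟩
    · rw [List.pairwise_cons]
      exact ⟨fun y hy => le_of_lt (h2 y hy), hsp.sublist (List.drop_sublist _ _)⟩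
    · intro x hx y hy
      rcases List.mem_cons.mp hy with h | h
      · exact h ▸ h1 x hx
      · exact le_trans (h1 x hx) (le_of_lt (h2 y h))
  exact PySem.List.sorted_id_eq_of_perm_of_pairwise _ _ hperm hpw

lemma outer_invariant (array : List Int) (i : Nat) (hi : i ≤ array.length) :
    (List.map (fun k : Nat => (k : Int)) (List.range i)).foldl
      (fun st j =>
        match PySem.List.pyGet? st.2 j with
        | none => st
        | some key =>
          let p := shiftLoop st.2 key (j - 1)
          (st.1 ++ [p.2 + 2], p.1.set (p.2 + 1).toNat key))
      ([], array) =
    ((List.range i).map (fun k =>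
        (1 : Int) + ((array.take k).countP (fun x => x ≤ array.getD k 0) : Int)),
      (PySem.List.sorted (array.take i) (fun x => x) false) ++ array.drop i) := by
  induction i with
  | zero => simp [PySem.List.sorted]
  | succ i ih =>
    have hi' : i < array.length := hi
    rw [List.range_succ, List.map_append, List.foldl_append, ih (le_of_lt hi')]
    set S := PySem.List.sorted (array.take i) (fun x => x) false with hS
    set c := S.countP (fun x => x ≤ array[i]) with hc
    have hlenS : S.length = i := by
      rw [hS, PySem.List.length_sorted, List.length_take]
      omega
    have hdrop : array.drop i = array[i] :: array.drop (i+1) := List.drop_eq_getElem_cons hi'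
    have hget : PySem.List.pyGet? (S ++ array.drop i) (i : Int) = some array[i] := by
      rw [hdrop]
      have h := PySem.List.pyGet?_append_length (pre := S) (y := array[i]) (ys := array.drop (i+1))
      rwa [hlenS] at h
    obtain ⟨arr', hsh, hset⟩ := shiftLoop_spec array[i] S array[i] (array.drop (i+1))
      (PySem.List.sorted_pairwise _ _)
    simp only [List.map_append, List.map_cons, List.map_nil, List.foldl_cons,
      List.foldl_nil, hget]
    have hidx : ((i:Int) - 1) = ((S.length : Int) - 1) := by rw [hlenS]
    rw [hdrop, hidx, hsh]
    have hc2 : List.countP (fun x => decide (x ≤ array[i])) S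
        = List.countP (fun x => decide (x ≤ array.getD i 0)) (List.take i array) := by
      rw [List.getD_eq_getElem array 0 hi']
      exact (PySem.List.sorted_perm _ _ _).countP_eq _
    simp only [Prod.mk.injEq]
    refine ⟨?_, ?_⟩
    · have he : (List.countP (fun x => decide (x ≤ array[i])) S : Int) - 1 + 2
          = 1 + (List.countP (fun x => decide (x ≤ array.getD i 0)) (List.take i array) : Int) := by
        rw [← hc2]; omega
      rw [he]
    · have htn : ((List.countP (fun x => decide (x ≤ array[i])) S : Int) - 1 + 1).toNat
          = List.countP (fun x => decide (x ≤ array[i])) S := by omega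
      rw [htn, hset, sorted_insert_eq array i hi']
      rw [hS]; simp

-- ===== VERDICT (by name: the statement is the Claim_ definition above) =====
theorem sort_by_insertion_spec : Claim_equal_sort_by_insertion := by
  intro array _
  unfold Spec_sort_by_insertion sort_by_insertion sort_by_insertion_alt
  rw [PySem.List.pyRange_zero_natCast, outer_invariant array array.length le_rfl]
  simp only [List.take_length, List.drop_length, List.append_nil, Prod.mk.injEq]
  refine ⟨?_, trivial⟩
  rw [PySem.List.enumerate_eq_map_pyRange array 0]
  simp only [PySem.List.len_eq]
  rw [PySem.List.pyRange_zero_natCast, List.map_map, List.map_map]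
  apply List.map_congr_left
  intro k hk
  simp only [Function.comp_apply, PySem.List.slice_to_natCast, PySem.List.pyGetD_natCast]
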